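-- pv_equiv track=rewrite | github.com/pypi-data/pypi-mirror-402 | packages/firefeed-core/firefeed_core-1.0.0-py3-none-any.whl/firefeed_core/utils/cache_utils.py | validate_cache_key
-- ===== SOURCE A (Python) =====
-- def validate_cache_key(key: str) -> bool:
--     """
--     Validate cache key format.
--
--     Args:
--         key: Cache key to validate
--
--     Returns:
--         True if key is valid, False otherwise
--     """
--     if not key or not isinstance(key, str):
--         return False
--
--     # Check for invalid characters
--     invalid_chars = [' ', '\n', '\r', '\t', '\0', '\x0b', '/', '\\', '?', '&', '=', '#']
--     for char in invalid_chars: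
--         if char in key:
--             return False
--
--     # Check length
--     if len(key) > 250:
--         return False
--
--     return True
-- ===== SOURCE B (Python) =====
-- INVALID = frozenset(' \n\r\t\0\x0b/\\?&=#')
--
-- def validate_cache_key(key: str) -> bool:
--     if not key or not isinstance(key, str):
--         return False
--     return not (len(key) > 250 or any(c in INVALID for c in key))
-- ===== Notes on version B (the rewrite author's own statement) =====
-- stated objective: idiomatic
-- what changed: Instead of looping over the 12-character invalid alphabet and scanning the key for each character, B makes a single pass over the key testing each character against a frozenset, combined with the length check in one boolean expression.
import Mathlib
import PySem

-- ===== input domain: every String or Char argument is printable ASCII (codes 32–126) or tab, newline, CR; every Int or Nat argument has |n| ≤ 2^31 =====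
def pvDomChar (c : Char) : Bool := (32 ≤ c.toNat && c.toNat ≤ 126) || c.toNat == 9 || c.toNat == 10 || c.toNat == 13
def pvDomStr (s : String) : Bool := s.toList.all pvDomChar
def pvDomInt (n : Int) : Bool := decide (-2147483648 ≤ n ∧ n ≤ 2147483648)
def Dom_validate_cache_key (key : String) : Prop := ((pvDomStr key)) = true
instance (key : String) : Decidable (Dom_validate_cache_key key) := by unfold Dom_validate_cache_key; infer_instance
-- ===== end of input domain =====

-- B: one pass over the key testing membership in an invalid-character set, instead of A's
-- loop over the 12-character invalid alphabet scanning the key for each (idiomatic; same result).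

-- ===== PORT A =====
-- A's loop 'for char in invalid_chars: if char in key: return False' as structural recursion
-- over the invalid-character list; 'char in key' is substring membership of a 1-char string,
-- i.e. character membership in key.toList.
def pvLoopA (ks : List Char) : List Char → Bool
  | [] =>
      -- after the loop: length check, then True
      if ks.length > 250 then false else true
  | c :: rest => if ks.contains c then false else pvLoopA ks rest

def validate_cache_key (key : String) : Bool :=
  if key.toList = [] then false
  else
    pvLoopA key.toList
      [' ', '\n', '\r', '\t', Char.ofNat 0, Char.ofNat 11, '/', '\\', '?', '&', '=', '#']

-- ===== PORT B =====
def pvInvalid : List Char :=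
  [' ', '\n', '\r', '\t', Char.ofNat 0, Char.ofNat 11, '/', '\\', '?', '&', '=', '#']

def validate_cache_key_alt (key : String) : Bool :=
  if key.toList = [] then false
  else !(decide (key.toList.length > 250) || key.toList.any (fun c => pvInvalid.contains c))

-- ===== PRECONDITION & SPEC =====
def Spec_validate_cache_key (key : String) (out : Bool) : Prop := out = validate_cache_key_alt key
instance (key : String) (out : Bool) : Decidable (Spec_validate_cache_key key out) := by unfold Spec_validate_cache_key; infer_instance

-- ===== CLAIM (what is proved, stated in full; the proofs are below) =====
def Claim_equal_validate_cache_key : Prop := ∀ (key : String), Dom_validate_cache_key key → Spec_validate_cache_key key (validate_cache_key key)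

-- ===== LEMMAS AND PROOFS =====
-- A's loop over the alphabet equals B's single pass: both compute "no char of ks lies in
-- the alphabet, and |ks| ≤ 250".
theorem pvLoopA_eq (ks : List Char) : ∀ (inv : List Char),
    pvLoopA ks inv = !(decide (ks.length > 250) || ks.any (fun c => inv.contains c)) := by
  intro inv
  induction inv with
  | nil => simp [pvLoopA]
  | cons c rest ih =>
      by_cases h : ks.contains c
      · simp only [pvLoopA, h, if_pos]
        have hm : c ∈ ks := List.contains_iff_mem.mp h
        have : ks.any (fun x => (c :: rest).contains x) = true := by
          simp only [List.any_eq_true]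
          exact ⟨c, hm, by simp⟩
        simp only [this, Bool.or_true, Bool.not_true]
      · simp only [pvLoopA, h, Bool.false_eq_true, if_false, ih]
        congr 1
        congr 1
        apply Bool.eq_iff_iff.mpr
        simp only [List.any_eq_true, List.contains_iff_mem, List.mem_cons]
        constructor
        · rintro ⟨x, hx, hxm⟩; exact ⟨x, hx, Or.inr hxm⟩
        · rintro ⟨x, hx, hxm | hxm⟩
          · exact absurd (List.contains_iff_mem.mpr (hxm ▸ hx)) h
          · exact ⟨x, hx, hxm⟩

-- ===== VERDICT (by name: the statement is the Claim_ definition above) =====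
theorem validate_cache_key_spec : Claim_equal_validate_cache_key := by
  intro key _
  unfold Spec_validate_cache_key validate_cache_key validate_cache_key_alt
  by_cases h : key.toList = []
  · simp [h]
  · simp only [h, if_false]
    exact pvLoopA_eq key.toList pvInvalid
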